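-- pv_equiv track=rewrite | github.com/LK6991/M932_Chatbot | Basic.py | cheapest_library
-- ===== SOURCE A (Python) =====
-- mock_data = {
--     "e-Library1": {
--         "Pancakes_CookBook": {"price": 11, "author": "AJ", "genre": "Cooking"},
--         "Futuristic_Sports": {"price": 15, "author": "AB", "genre": "Science Fiction"},
--         "Apple_Trees": {"price": 20, "author": "AB", "genre": "Gardening"},
--         "Ancient_Seeds": {"price": 25, "author": "Michael Brown", "genre": "Gardening"},
--         "Chess_Mantras": {"price": 6, "author": "David Wilson", "genre": "Games"},
--         "Cars_Mars": {"price": 11, "author": "AC", "genre": "Science Fiction"},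
--         "Purple_Waters": {"price": 7, "author": "Sarah Taylor", "genre": "Metaphysics"}
--     },
--     "e-Library2": {
--         "Pancakes_CookBook": {"price": 12, "author": "John Doe", "genre": "Cooking"},
--         "Futuristic_Sports": {"price": 16, "author": "AB", "genre": "Science Fiction"},
--         "Apple_Trees": {"price": 21, "author": "Emily Johnson", "genre": "Gardening"},
--         "Ancient_Seeds": {"price": 11, "author": "Michael Brown", "genre": "Gardening"},
--         "Crepe_Recipes": {"price": 14, "author": "Anna White", "genre": "Cooking"},
--         "Chess_Mantras": {"price": 7, "author": "David Wilson", "genre": "Games"},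
--         "Cars_Mars": {"price": 11, "author": "AC", "genre": "Science Fiction"},
--         "Lake_Fishing": {"price": 7, "author": "Robert Green", "genre": "Hobbies"}
--     },
--     "e-Library3": {
--         "Pancakes_CookBook": {"price": 14, "author": "John Doe", "genre": "Cooking"},
--         "Futuristic_Sports": {"price": 17, "author": "Jane Smith", "genre": "Science Fiction"},
--         "Apple_Trees": {"price": 22, "author": "Emily Johnson", "genre": "Gardening"},
--         "Ancient_Seeds": {"price": 9, "author": "Michael Brown", "genre": "Gardening"},
--         "Chess_Mantras": {"price": 10, "author": "David Wilson", "genre": "Games"},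
--         "Cars_Mars": {"price": 9, "author": "AC", "genre": "Science Fiction"},
--         "Lake_Fishing": {"price": 6, "author": "Robert Green", "genre": "Hobbies"}
--     },
--     "e-Library4": {
--         "Pancakes_CookBook": {"price": 14, "author": "John Doe", "genre": "Cooking"},
--         "Purple_Waters": {"price": 11, "author": "Sarah Taylor", "genre": "Metaphysics"},
--         "Apple_Trees": {"price": 22, "author": "Emily Johnson", "genre": "Gardening"},
--         "Ancient_Seeds": {"price": 17, "author": "Michael Brown", "genre": "Gardening"},
--         "Chess_Mantras": {"price": 10, "author": "David Wilson", "genre": "Games"},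
--         "Cars_Mars": {"price": 9, "author": "AC", "genre": "Science Fiction"}
--     },
--     "e-Library5": {
--         "Pancakes_CookBook": {"price": 14, "author": "John Doe", "genre": "Cooking"},
--         "Purple_Waters": {"price": 10, "author": "Sarah Taylor", "genre": "Metaphysics"},
--         "Crepe_Recipes": {"price": 17, "author": "Anna White", "genre": "Cooking"},
--         "Ancient_Seeds": {"price": 15, "author": "Michael Brown", "genre": "Gardening"},
--         "Chess_Mantras": {"price": 10, "author": "David Wilson", "genre": "Games"},
--         "Cars_Mars": {"price": 9, "author": "AC", "genre": "Science Fiction"},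
--         "Lake_Fishing": {"price": 8, "author": "Robert Green", "genre": "Hobbies"}
--     }
-- }
--
-- def cheapest_library(book_title):
--     """Find the library with the cheapest price for a specific book."""
--     cheapest_price = float('inf')
--     cheapest_library = None
--
--     for library, books in mock_data.items():
--         if book_title in books:
--             price = books[book_title]['price']
--             if price < cheapest_price:
--                 cheapest_price = price
--                 cheapest_library = library
--
--     if cheapest_library is not None:
--         return cheapest_library, cheapest_price
--     else:
--         return None, None
-- ===== SOURCE B (Python) =====
-- # mock_data is a fixed module constant, so the cheapest offer per title is itself a
-- # constant: B stores that answer table directly as a literal dict (title -> (library,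
-- # price), first library wins ties because A uses a strict '<') and the function is a
-- # single dict lookup with a (None, None) default.
-- _CHEAPEST = {
--     "Pancakes_CookBook": ("e-Library1", 11),
--     "Futuristic_Sports": ("e-Library1", 15),
--     "Apple_Trees": ("e-Library1", 20),
--     "Ancient_Seeds": ("e-Library3", 9),
--     "Chess_Mantras": ("e-Library1", 6),
--     "Cars_Mars": ("e-Library3", 9),
--     "Purple_Waters": ("e-Library1", 7),
--     "Crepe_Recipes": ("e-Library2", 14),
--     "Lake_Fishing": ("e-Library3", 6),
-- }
--
-- def cheapest_library(book_title):
--     """Find the library with the cheapest price for a specific book."""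
--     return _CHEAPEST.get(book_title, (None, None))
-- ===== Notes on version B (the rewrite author's own statement) =====
-- stated objective: simpler
-- what changed: Since mock_data is a fixed module constant, B replaces A's per-call min-scan over all libraries with a precomputed literal title -> (library, price) index dict (strict-< first-library tie-break preserved) and a single dict .get with a (None, None) default.
import Mathlib
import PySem

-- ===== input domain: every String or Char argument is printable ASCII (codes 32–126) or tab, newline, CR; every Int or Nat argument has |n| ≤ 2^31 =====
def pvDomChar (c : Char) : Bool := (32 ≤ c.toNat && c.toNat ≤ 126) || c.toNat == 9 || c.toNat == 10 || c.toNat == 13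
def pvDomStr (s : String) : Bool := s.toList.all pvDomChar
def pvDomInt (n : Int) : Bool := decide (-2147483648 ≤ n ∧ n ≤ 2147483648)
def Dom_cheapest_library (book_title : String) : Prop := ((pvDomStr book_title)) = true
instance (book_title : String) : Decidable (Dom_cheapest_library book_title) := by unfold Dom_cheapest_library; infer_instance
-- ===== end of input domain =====

-- ===== PORT A =====
-- B replaces A's per-call min-scan over the constant mock_data with a precomputed
-- literal title -> (library, price) index and a single dict lookup (objective: simpler).
structure Book where
  price : Int
  author : String
  genre : String
deriving DecidableEq, Repr

def mockData : List (String × PySem.Dict String Book) := [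
  ("e-Library1", PySem.Dict.mk [("Pancakes_CookBook", ⟨11, "AJ", "Cooking"⟩), ("Futuristic_Sports", ⟨15, "AB", "Science Fiction"⟩), ("Apple_Trees", ⟨20, "AB", "Gardening"⟩), ("Ancient_Seeds", ⟨25, "Michael Brown", "Gardening"⟩), ("Chess_Mantras", ⟨6, "David Wilson", "Games"⟩), ("Cars_Mars", ⟨11, "AC", "Science Fiction"⟩), ("Purple_Waters", ⟨7, "Sarah Taylor", "Metaphysics"⟩)]),
  ("e-Library2", PySem.Dict.mk [("Pancakes_CookBook", ⟨12, "John Doe", "Cooking"⟩), ("Futuristic_Sports", ⟨16, "AB", "Science Fiction"⟩), ("Apple_Trees", ⟨21, "Emily Johnson", "Gardening"⟩), ("Ancient_Seeds", ⟨11, "Michael Brown", "Gardening"⟩), ("Crepe_Recipes", ⟨14, "Anna White", "Cooking"⟩), ("Chess_Mantras", ⟨7, "David Wilson", "Games"⟩), ("Cars_Mars", ⟨11, "AC", "Science Fiction"⟩), ("Lake_Fishing", ⟨7, "Robert Green", "Hobbies"⟩)]),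
  ("e-Library3", PySem.Dict.mk [("Pancakes_CookBook", ⟨14, "John Doe", "Cooking"⟩), ("Futuristic_Sports", ⟨17, "Jane Smith", "Science Fiction"⟩), ("Apple_Trees", ⟨22, "Emily Johnson", "Gardening"⟩), ("Ancient_Seeds", ⟨9, "Michael Brown", "Gardening"⟩), ("Chess_Mantras", ⟨10, "David Wilson", "Games"⟩), ("Cars_Mars", ⟨9, "AC", "Science Fiction"⟩), ("Lake_Fishing", ⟨6, "Robert Green", "Hobbies"⟩)]),
  ("e-Library4", PySem.Dict.mk [("Pancakes_CookBook", ⟨14, "John Doe", "Cooking"⟩), ("Purple_Waters", ⟨11, "Sarah Taylor", "Metaphysics"⟩), ("Apple_Trees", ⟨22, "Emily Johnson", "Gardening"⟩), ("Ancient_Seeds", ⟨17, "Michael Brown", "Gardening"⟩), ("Chess_Mantras", ⟨10, "David Wilson", "Games"⟩), ("Cars_Mars", ⟨9, "AC", "Science Fiction"⟩)]),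
  ("e-Library5", PySem.Dict.mk [("Pancakes_CookBook", ⟨14, "John Doe", "Cooking"⟩), ("Purple_Waters", ⟨10, "Sarah Taylor", "Metaphysics"⟩), ("Crepe_Recipes", ⟨17, "Anna White", "Cooking"⟩), ("Ancient_Seeds", ⟨15, "Michael Brown", "Gardening"⟩), ("Chess_Mantras", ⟨10, "David Wilson", "Games"⟩), ("Cars_Mars", ⟨9, "AC", "Science Fiction"⟩), ("Lake_Fishing", ⟨8, "Robert Green", "Hobbies"⟩)])]

-- A keeps `cheapest_price = float('inf')` until a copy is found; ported as `none` = infinity,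
-- with the comparison `price < cheapest_price` true when the state is still `none`.
def cheapest_library (book_title : String) : Option String × Option Int :=
  let st := mockData.foldl (fun (st : Option Int × Option String) lb =>
    match (lb.2).get? book_title with
    | some bk =>
        if (match st.1 with | none => true | some p => bk.price < p) then
          (some bk.price, some lb.1)
        else st
    | none => st) (none, none)
  match st.2 with
  | some lib => (some lib, st.1)
  | none => (none, none)

-- ===== PORT B =====
-- Source B's literal answer table _CHEAPEST (title -> (library, price))
def cheapestTable : PySem.Dict String (String × Int) := PySem.Dict.mk [
  ("Pancakes_CookBook", ("e-Library1", 11)),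
  ("Futuristic_Sports", ("e-Library1", 15)),
  ("Apple_Trees", ("e-Library1", 20)),
  ("Ancient_Seeds", ("e-Library3", 9)),
  ("Chess_Mantras", ("e-Library1", 6)),
  ("Cars_Mars", ("e-Library3", 9)),
  ("Purple_Waters", ("e-Library1", 7)),
  ("Crepe_Recipes", ("e-Library2", 14)),
  ("Lake_Fishing", ("e-Library3", 6))]

-- `_CHEAPEST.get(book_title, (None, None))`
def cheapest_library_alt (book_title : String) : Option String × Option Int :=
  match cheapestTable.get? book_title with
  | some lp => (some lp.1, some lp.2)
  | none => (none, none)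

-- ===== PRECONDITION & SPEC =====
def Spec_cheapest_library (book_title : String) (out : Option String × Option Int) : Prop := out = cheapest_library_alt book_title
instance (book_title : String) (out : Option String × Option Int) : Decidable (Spec_cheapest_library book_title out) := by unfold Spec_cheapest_library; infer_instance

-- ===== CLAIM (what is proved, stated in full; the proofs are below) =====
def Claim_equal_cheapest_library : Prop := ∀ (book_title : String), Dom_cheapest_library book_title → Spec_cheapest_library book_title (cheapest_library book_title)

-- ===== LEMMAS AND PROOFS =====
theorem ports_agree (t : String) : cheapest_library t = cheapest_library_alt t := by
  by_cases h1 : t = "Pancakes_CookBook"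
  · subst h1; decide
  by_cases h2 : t = "Futuristic_Sports"
  · subst h2; decide
  by_cases h3 : t = "Apple_Trees"
  · subst h3; decide
  by_cases h4 : t = "Ancient_Seeds"
  · subst h4; decide
  by_cases h5 : t = "Chess_Mantras"
  · subst h5; decide
  by_cases h6 : t = "Cars_Mars"
  · subst h6; decide
  by_cases h7 : t = "Purple_Waters"
  · subst h7; decide
  by_cases h8 : t = "Crepe_Recipes"
  · subst h8; decide
  by_cases h9 : t = "Lake_Fishing"
  · subst h9; decide
  have f1 : ("Pancakes_CookBook" == t) = false := by rw [beq_eq_false_iff_ne]; exact Ne.symm h1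
  have f2 : ("Futuristic_Sports" == t) = false := by rw [beq_eq_false_iff_ne]; exact Ne.symm h2
  have f3 : ("Apple_Trees" == t) = false := by rw [beq_eq_false_iff_ne]; exact Ne.symm h3
  have f4 : ("Ancient_Seeds" == t) = false := by rw [beq_eq_false_iff_ne]; exact Ne.symm h4
  have f5 : ("Chess_Mantras" == t) = false := by rw [beq_eq_false_iff_ne]; exact Ne.symm h5
  have f6 : ("Cars_Mars" == t) = false := by rw [beq_eq_false_iff_ne]; exact Ne.symm h6
  have f7 : ("Purple_Waters" == t) = false := by rw [beq_eq_false_iff_ne]; exact Ne.symm h7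
  have f8 : ("Crepe_Recipes" == t) = false := by rw [beq_eq_false_iff_ne]; exact Ne.symm h8
  have f9 : ("Lake_Fishing" == t) = false := by rw [beq_eq_false_iff_ne]; exact Ne.symm h9
  have g1 : (PySem.Dict.mk ([("Pancakes_CookBook", ⟨11, "AJ", "Cooking"⟩), ("Futuristic_Sports", ⟨15, "AB", "Science Fiction"⟩), ("Apple_Trees", ⟨20, "AB", "Gardening"⟩), ("Ancient_Seeds", ⟨25, "Michael Brown", "Gardening"⟩), ("Chess_Mantras", ⟨6, "David Wilson", "Games"⟩), ("Cars_Mars", ⟨11, "AC", "Science Fiction"⟩), ("Purple_Waters", ⟨7, "Sarah Taylor", "Metaphysics"⟩)] : List (String × Book))).get? t = none := by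
    simp only [PySem.Dict.get?_mk_cons, f1, f2, f3, f4, f5, f6, f7, Bool.false_eq_true, if_false]
    simp [PySem.Dict.get?, List.find?]
  have g2 : (PySem.Dict.mk ([("Pancakes_CookBook", ⟨12, "John Doe", "Cooking"⟩), ("Futuristic_Sports", ⟨16, "AB", "Science Fiction"⟩), ("Apple_Trees", ⟨21, "Emily Johnson", "Gardening"⟩), ("Ancient_Seeds", ⟨11, "Michael Brown", "Gardening"⟩), ("Crepe_Recipes", ⟨14, "Anna White", "Cooking"⟩), ("Chess_Mantras", ⟨7, "David Wilson", "Games"⟩), ("Cars_Mars", ⟨11, "AC", "Science Fiction"⟩), ("Lake_Fishing", ⟨7, "Robert Green", "Hobbies"⟩)] : List (String × Book))).get? t = none := by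
    simp only [PySem.Dict.get?_mk_cons, f1, f2, f3, f4, f8, f5, f6, f9, Bool.false_eq_true, if_false]
    simp [PySem.Dict.get?, List.find?]
  have g3 : (PySem.Dict.mk ([("Pancakes_CookBook", ⟨14, "John Doe", "Cooking"⟩), ("Futuristic_Sports", ⟨17, "Jane Smith", "Science Fiction"⟩), ("Apple_Trees", ⟨22, "Emily Johnson", "Gardening"⟩), ("Ancient_Seeds", ⟨9, "Michael Brown", "Gardening"⟩), ("Chess_Mantras", ⟨10, "David Wilson", "Games"⟩), ("Cars_Mars", ⟨9, "AC", "Science Fiction"⟩), ("Lake_Fishing", ⟨6, "Robert Green", "Hobbies"⟩)] : List (String × Book))).get? t = none := by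
    simp only [PySem.Dict.get?_mk_cons, f1, f2, f3, f4, f5, f6, f9, Bool.false_eq_true, if_false]
    simp [PySem.Dict.get?, List.find?]
  have g4 : (PySem.Dict.mk ([("Pancakes_CookBook", ⟨14, "John Doe", "Cooking"⟩), ("Purple_Waters", ⟨11, "Sarah Taylor", "Metaphysics"⟩), ("Apple_Trees", ⟨22, "Emily Johnson", "Gardening"⟩), ("Ancient_Seeds", ⟨17, "Michael Brown", "Gardening"⟩), ("Chess_Mantras", ⟨10, "David Wilson", "Games"⟩), ("Cars_Mars", ⟨9, "AC", "Science Fiction"⟩)] : List (String × Book))).get? t = none := by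
    simp only [PySem.Dict.get?_mk_cons, f1, f7, f3, f4, f5, f6, Bool.false_eq_true, if_false]
    simp [PySem.Dict.get?, List.find?]
  have g5 : (PySem.Dict.mk ([("Pancakes_CookBook", ⟨14, "John Doe", "Cooking"⟩), ("Purple_Waters", ⟨10, "Sarah Taylor", "Metaphysics"⟩), ("Crepe_Recipes", ⟨17, "Anna White", "Cooking"⟩), ("Ancient_Seeds", ⟨15, "Michael Brown", "Gardening"⟩), ("Chess_Mantras", ⟨10, "David Wilson", "Games"⟩), ("Cars_Mars", ⟨9, "AC", "Science Fiction"⟩), ("Lake_Fishing", ⟨8, "Robert Green", "Hobbies"⟩)] : List (String × Book))).get? t = none := by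
    simp only [PySem.Dict.get?_mk_cons, f1, f7, f8, f4, f5, f6, f9, Bool.false_eq_true, if_false]
    simp [PySem.Dict.get?, List.find?]
  have gT : cheapestTable.get? t = none := by
    simp only [cheapestTable, PySem.Dict.get?_mk_cons, f1, f2, f3, f4, f5, f6, f7, f8, f9, Bool.false_eq_true, if_false]
    simp [PySem.Dict.get?, List.find?]
  simp only [cheapest_library, cheapest_library_alt, mockData, List.foldl, g1, g2, g3, g4, g5, gT]

-- ===== VERDICT (by name: the statement is the Claim_ definition above) =====
theorem cheapest_library_spec : Claim_equal_cheapest_library := by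
  intro t _
  exact ports_agree t
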